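-- pv_equiv track=rewrite | github.com/CuiMiao-HIT/miniSNV | utils.py | is_homopolymer
-- ===== SOURCE A (Python) =====
-- def is_homopolymer(refSeq, refStart, start, end):
--     reference = refSeq[start-refStart:end-refStart]
--     homo_cnt = 0
--     min_homo_length = 9
--     for i in range(1, len(reference)):
--         if reference[i] == reference[i-1]:
--             homo_cnt += 1
--         else:
--             if homo_cnt >= min_homo_length:
--                 return True
--             else:
--                 homo_cnt = 0
--
--
--     return True if homo_cnt >= min_homo_length else False
-- ===== SOURCE B (Python) =====
-- def is_homopolymer(refSeq, refStart, start, end):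
--     reference = refSeq[start-refStart:end-refStart]
--     i, n = 0, len(reference)
--     while i < n:
--         j = i
--         while j < n and reference[j] == reference[i]:
--             j += 1
--         if j - i >= 10:
--             return True
--         i = j
--     return False
-- ===== Notes on version B (the rewrite author's own statement) =====
-- stated objective: simpler
-- what changed: Replaces the running-counter-with-reset scan (counter = run length minus one, threshold 9, checked both at each mismatch and after the loop) by a two-index run-grouping scan that measures each maximal run directly and returns True as soon as a run of length >= 10 is found.
import Mathlib
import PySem

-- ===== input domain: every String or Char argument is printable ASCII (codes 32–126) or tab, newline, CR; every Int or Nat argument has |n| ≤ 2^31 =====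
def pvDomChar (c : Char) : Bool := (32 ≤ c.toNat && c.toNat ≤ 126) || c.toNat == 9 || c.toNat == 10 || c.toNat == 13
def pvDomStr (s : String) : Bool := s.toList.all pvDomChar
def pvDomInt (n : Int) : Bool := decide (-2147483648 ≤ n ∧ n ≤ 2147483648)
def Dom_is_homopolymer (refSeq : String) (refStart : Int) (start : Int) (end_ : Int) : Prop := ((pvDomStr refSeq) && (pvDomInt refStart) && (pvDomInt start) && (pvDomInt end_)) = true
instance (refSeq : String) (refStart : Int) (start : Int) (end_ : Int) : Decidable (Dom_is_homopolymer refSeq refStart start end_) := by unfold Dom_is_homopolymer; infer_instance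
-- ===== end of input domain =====

-- B replaces A's running-counter-with-reset scan by a two-index run-grouping scan; same return value, no speed claim.

-- ===== PORT A =====
-- the 'for i in range(1, len(reference))' loop with early return, state homo_cnt : Int
def isHomoLoopA (ref : List Char) (i : Nat) (homo_cnt : Int) : Bool :=
  if i < ref.length then
    if ref.getD i ' ' = ref.getD (i-1) ' ' then
      isHomoLoopA ref (i+1) (homo_cnt + 1)
    else if homo_cnt ≥ 9 then true
    else isHomoLoopA ref (i+1) 0
  else decide (homo_cnt ≥ 9)
termination_by ref.length - i

def is_homopolymer (refSeq : String) (refStart : Int) (start : Int) (end_ : Int) : Bool :=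
  let reference := PySem.List.slice refSeq.toList (some (start - refStart)) (some (end_ - refStart))
  isHomoLoopA reference 1 0

-- ===== PORT B =====
-- inner 'while j < n and reference[j] == reference[i]: j += 1'
def isHomoRunEnd (ref : List Char) (c : Char) (j : Nat) : Nat :=
  if h : j < ref.length ∧ ref.getD j ' ' = c then isHomoRunEnd ref c (j+1) else j
termination_by ref.length - j
decreasing_by omega

theorem isHomoRunEnd_ge (ref : List Char) (c : Char) (j : Nat) : j ≤ isHomoRunEnd ref c j := by
  fun_induction isHomoRunEnd ref c j with
  | case1 j h ih => omega
  | case2 j h => omega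

-- outer 'while i < n' loop
def isHomoLoopB (ref : List Char) (i : Nat) : Bool :=
  if h : i < ref.length then
    let j := isHomoRunEnd ref (ref.getD i ' ') i
    if j - i ≥ 10 then true else isHomoLoopB ref j
  else false
termination_by ref.length - i
decreasing_by
  have h1 : i + 1 ≤ isHomoRunEnd ref (ref.getD i ' ') (i+1) := isHomoRunEnd_ge ..
  have h2 : isHomoRunEnd ref (ref.getD i ' ') i = isHomoRunEnd ref (ref.getD i ' ') (i+1) := by
    rw [isHomoRunEnd]; simp [h]
  omega

def is_homopolymer_alt (refSeq : String) (refStart : Int) (start : Int) (end_ : Int) : Bool :=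
  let reference := PySem.List.slice refSeq.toList (some (start - refStart)) (some (end_ - refStart))
  isHomoLoopB reference 0

-- ===== PRECONDITION & SPEC =====
def Spec_is_homopolymer (refSeq : String) (refStart : Int) (start : Int) (end_ : Int) (out : Bool) : Prop := out = is_homopolymer_alt refSeq refStart start end_
instance (refSeq : String) (refStart : Int) (start : Int) (end_ : Int) (out : Bool) : Decidable (Spec_is_homopolymer refSeq refStart start end_ out) := by unfold Spec_is_homopolymer; infer_instance

-- ===== CLAIM (what is proved, stated in full; the proofs are below) =====
def Claim_equal_is_homopolymer : Prop := ∀ (refSeq : String) (refStart : Int) (start : Int) (end_ : Int), Dom_is_homopolymer refSeq refStart start end_ → Spec_is_homopolymer refSeq refStart start end_ (is_homopolymer refSeq refStart start end_)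

-- ===== LEMMAS AND PROOFS =====

theorem isHomoRunEnd_le (ref : List Char) (c : Char) (j : Nat) (hj : j ≤ ref.length) :
    isHomoRunEnd ref c j ≤ ref.length := by
  fun_induction isHomoRunEnd ref c j with
  | case1 j h ih => exact ih (by omega)
  | case2 j h => exact hj

-- A's loop, entered at index i ≥ 1 with counter h, consumes the rest of the maximal run of
-- ref[i-1] in one block: its result is decided at the run's end.
theorem isHomoLoopA_run (ref : List Char) :
    ∀ m i (h : Int), ref.length - i = m → 1 ≤ i → i ≤ ref.length →
    isHomoLoopA ref i h =
      (let j := isHomoRunEnd ref (ref.getD (i-1) ' ') i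
       if h + ((j : Int) - (i : Int)) ≥ 9 then true
       else if j = ref.length then false
       else isHomoLoopA ref (j+1) 0) := by
  intro m
  induction m with
  | zero =>
    intro i h hm hi hle
    have hiL : i = ref.length := by omega
    have hRun : isHomoRunEnd ref (ref.getD (i-1) ' ') i = i := by
      rw [isHomoRunEnd, dif_neg (fun hc => absurd hc.1 (by omega))]
    rw [isHomoLoopA, if_neg (by omega)]
    simp only [hRun, sub_self, add_zero]
    by_cases hh : h ≥ 9
    · rw [if_pos hh]; exact decide_eq_true hh
    · rw [if_neg hh, if_pos hiL]; exact decide_eq_false hh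
  | succ m ih =>
    intro i h hm hi hle
    have hlt : i < ref.length := by omega
    rw [isHomoLoopA, if_pos hlt]
    by_cases heq : ref.getD i ' ' = ref.getD (i-1) ' '
    · rw [if_pos heq, ih (i+1) (h+1) (by omega) (by omega) (by omega)]
      have hRun : isHomoRunEnd ref (ref.getD (i-1) ' ') i
          = isHomoRunEnd ref (ref.getD (i-1) ' ') (i+1) := by
        rw [isHomoRunEnd, dif_pos ⟨hlt, heq⟩]
      simp only [Nat.add_sub_cancel, heq, hRun]
      apply if_congr _ rfl rfl
      push_cast
      omega
    · rw [if_neg heq]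
      have hRun : isHomoRunEnd ref (ref.getD (i-1) ' ') i = i := by
        rw [isHomoRunEnd, dif_neg (fun hc => heq hc.2)]
      simp only [hRun, sub_self, add_zero, if_neg (show ¬ i = ref.length by omega)]

-- both loops are done once the index has passed the end of the list
theorem loop_base (ref : List Char) (i : Nat) (hge : ref.length ≤ i) :
    isHomoLoopA ref (i+1) 0 = isHomoLoopB ref i := by
  rw [isHomoLoopA, if_neg (by omega), isHomoLoopB, dif_neg (by omega)]
  decide

-- the bridge: A restarted after a run equals B started at the run's first index
theorem loopA_eq_loopB (ref : List Char) :
    ∀ m i, ref.length - i ≤ m → isHomoLoopA ref (i+1) 0 = isHomoLoopB ref i := by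
  intro m
  induction m with
  | zero =>
    intro i hm
    exact loop_base ref i (by omega)
  | succ m ih =>
    intro i hm
    by_cases hlt : i < ref.length
    swap
    · exact loop_base ref i (by omega)
    rw [isHomoLoopB]
    rw [dif_pos hlt]
    have hrun := isHomoLoopA_run ref (ref.length - (i+1)) (i+1) 0 rfl (by omega) (by omega)
    simp only [show i + 1 - 1 = i by omega] at hrun
    have hstep : isHomoRunEnd ref (ref.getD i ' ') i = isHomoRunEnd ref (ref.getD i ' ') (i+1) := by
      rw [isHomoRunEnd]; simp [hlt]
    rw [hrun, hstep]
    set j := isHomoRunEnd ref (ref.getD i ' ') (i+1) with hj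
    have hj1 : i + 1 ≤ j := isHomoRunEnd_ge ..
    have hjle : j ≤ ref.length := isHomoRunEnd_le ref _ (i+1) (by omega)
    by_cases hbig : j - i ≥ 10
    · rw [if_pos hbig, if_pos (by push_cast; omega)]
    · rw [if_neg hbig, if_neg (show ¬ ((0:Int) + ((j:Int) - ((i:Nat)+1:Nat)) ≥ 9) by push_cast; omega)]
      by_cases hend : j = ref.length
      · rw [if_pos hend, isHomoLoopB, dif_neg (by omega)]
      · rw [if_neg hend]
        exact ih j (by omega)

-- ===== VERDICT (by name: the statement is the Claim_ definition above) =====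
theorem is_homopolymer_spec : Claim_equal_is_homopolymer := by
  intro refSeq refStart start end_ _
  unfold Spec_is_homopolymer is_homopolymer is_homopolymer_alt
  exact loopA_eq_loopB _ _ 0 (Nat.le_refl _)
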